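-- pv_equiv track=rewrite | github.com/alphabet-al/Advent-Of-Code-2020 | Day16/Ticket_Translation.py | absent_values
-- ===== SOURCE A (Python) =====
-- def absent_values(crit_dict):
--     abv = crit_dict.values()
--     missing_num = []
--     numbers = []
--
--     for group in abv:
--         for sub_grp in group:
--             for val in sub_grp:
--                 numbers.append(val)
--
--     numbers.sort()
--
--     for num in range(numbers[1], numbers[-1]):
--         if num not in numbers:
--             missing_num.append(num)
--
--     return missing_num, min(numbers), max(numbers)
-- ===== SOURCE B (Python) =====
-- def absent_values(crit_dict):
--     numbers = sorted(v for group in crit_dict.values() for sub_grp in group for v in sub_grp)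
--     missing_num = []
--     for i in range(2, len(numbers)):
--         missing_num.extend(range(numbers[i - 1] + 1, numbers[i]))
--     return missing_num, numbers[0], numbers[-1]
-- ===== Notes on version B (the rewrite author's own statement) =====
-- stated objective: faster
-- what changed: Instead of scanning every integer in the span and testing list membership for each, B sorts the flattened values once and emits the missing integers directly from the gaps between consecutive sorted neighbours (from index 2 on, matching A's range start at numbers[1]), reading min/max off the ends of the sorted list.
import Mathlib
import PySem

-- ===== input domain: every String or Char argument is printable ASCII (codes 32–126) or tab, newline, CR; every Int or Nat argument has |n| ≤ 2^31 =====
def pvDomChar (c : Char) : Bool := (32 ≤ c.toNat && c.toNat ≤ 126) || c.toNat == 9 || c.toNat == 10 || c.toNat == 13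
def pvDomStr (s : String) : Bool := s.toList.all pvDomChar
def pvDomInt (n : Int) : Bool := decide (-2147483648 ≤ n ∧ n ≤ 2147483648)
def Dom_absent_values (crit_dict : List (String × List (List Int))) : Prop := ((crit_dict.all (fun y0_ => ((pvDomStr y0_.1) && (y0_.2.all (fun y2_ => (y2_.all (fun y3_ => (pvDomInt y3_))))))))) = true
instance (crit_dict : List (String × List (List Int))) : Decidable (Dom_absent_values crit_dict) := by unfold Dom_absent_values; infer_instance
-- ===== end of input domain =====

-- B replaces A's scan of every integer in the span with a membership test by a single
-- walk over the gaps between consecutive sorted values (faster when the span is wide).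

-- ===== PORT A =====
def absent_values (crit_dict : List (String × List (List Int))) : List Int × Int × Int :=
  let abv := (PySem.Dict.ofList crit_dict).values
  let numbers0 := abv.foldl (fun acc group =>
      group.foldl (fun acc sub_grp =>
        sub_grp.foldl (fun acc val => acc ++ [val]) acc) acc) ([] : List Int)
  let numbers := PySem.List.sorted numbers0 (fun x => x) false
  let missing_num := (PySem.List.pyRange (PySem.List.pyGetD numbers 1 0) (PySem.List.pyGetD numbers (-1) 0)).foldl
      (fun acc num => if !numbers.contains num then acc ++ [num] else acc) []
  (missing_num, (PySem.List.min? numbers (fun x => x)).getD 0, (PySem.List.max? numbers (fun x => x)).getD 0)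

-- ===== PORT B =====
def absent_values_alt (crit_dict : List (String × List (List Int))) : List Int × Int × Int :=
  let numbers := PySem.List.sorted ((PySem.Dict.ofList crit_dict).values.flatMap (fun group =>
      group.flatMap (fun sub_grp => sub_grp))) (fun x => x) false
  let missing_num := (PySem.List.pyRange 2 (PySem.List.len numbers)).foldl
      (fun acc i => acc ++ PySem.List.pyRange (PySem.List.pyGetD numbers (i - 1) 0 + 1) (PySem.List.pyGetD numbers i 0)) []
  (missing_num, PySem.List.pyGetD numbers 0 0, PySem.List.pyGetD numbers (-1) 0)

-- ===== PRECONDITION & SPEC =====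
-- A indexes numbers[1] and calls min/max, so it raises IndexError/ValueError unless the
-- flattened dict values contain at least two numbers; Pre_ admits exactly those inputs.
def Pre_absent_values (crit_dict : List (String × List (List Int))) : Prop :=
  2 ≤ ((PySem.Dict.ofList crit_dict).values.flatMap (fun group => group.flatMap (fun sub_grp => sub_grp))).length
instance (crit_dict : List (String × List (List Int))) : Decidable (Pre_absent_values crit_dict) := by unfold Pre_absent_values; infer_instance
def pvWitness_absent_values : (List (String × List (List Int))) := [("a", [[1, 5], [9]]), ("b", [[3]])]

def Spec_absent_values (crit_dict : List (String × List (List Int))) (out : List Int × Int × Int) : Prop := out = absent_values_alt crit_dict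
instance (crit_dict : List (String × List (List Int))) (out : List Int × Int × Int) : Decidable (Spec_absent_values crit_dict out) := by unfold Spec_absent_values; infer_instance

-- ===== CLAIM (what is proved, stated in full; the proofs are below) =====
def Claim_equal_absent_values : Prop := ∀ (crit_dict : List (String × List (List Int))), Dom_absent_values crit_dict → Pre_absent_values crit_dict → Spec_absent_values crit_dict (absent_values crit_dict)

-- ===== LEMMAS AND PROOFS =====

-- A's triple append loop flattens the dict values exactly as B's flatMap does.
theorem flatten_eq (abv : List (List (List Int))) (acc : List Int) :
    abv.foldl (fun acc group => group.foldl (fun acc sub_grp =>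
        sub_grp.foldl (fun acc val => acc ++ [val]) acc) acc) acc
      = acc ++ abv.flatMap (fun group => group.flatMap (fun sub_grp => sub_grp)) := by
  induction abv generalizing acc with
  | nil => simp
  | cons g gs ih =>
    have hmid : ∀ (acc : List Int), g.foldl (fun acc sub_grp =>
        sub_grp.foldl (fun acc val => acc ++ [val]) acc) acc = acc ++ g.flatMap (fun s => s) := by
      intro acc
      induction g generalizing acc with
      | nil => simp
      | cons s ss ihs =>
        rw [List.foldl_cons, PySem.List.foldl_append_singleton, ihs, List.flatMap_cons,
          List.append_assoc]
    rw [List.foldl_cons, hmid, ih, List.flatMap_cons, List.append_assoc]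

-- the gaps between consecutive elements of a list
def gaps : List Int → List Int
  | a :: b :: t => PySem.List.pyRange (a + 1) b ++ gaps (b :: t)
  | _ => []

theorem head_le_getLast (b : Int) (r : List Int) (hp : (b :: r).Pairwise (· ≤ ·)) :
    b ≤ (b :: r).getLast (by simp) := by
  rcases List.mem_cons.mp (List.getLast_mem (l := b :: r) (by simp)) with h | h
  · omega
  · exact (List.pairwise_cons.mp hp).1 _ h

theorem gaps_eq_filter (t : List Int) (ht : t ≠ []) (hp : t.Pairwise (· ≤ ·)) :
    gaps t = (PySem.List.pyRange (t.head ht) (t.getLast ht)).filter (fun n => !t.contains n) := by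
  induction t with
  | nil => simp at ht
  | cons a t ih =>
    cases t with
    | nil =>
      show ([] : List Int) = _
      rw [show (a :: ([] : List Int)).getLast (by simp) = a from rfl,
        show (a :: ([] : List Int)).head (by simp) = a from rfl,
        PySem.List.pyRange_one_eq_nil (le_refl a)]
      rfl
    | cons b r =>
      have hab : a ≤ b := (List.pairwise_cons.mp hp).1 b (by simp)
      have hp' : (b :: r).Pairwise (· ≤ ·) := (List.pairwise_cons.mp hp).2
      have hbr : ∀ x ∈ b :: r, b ≤ x := by
        intro x hx
        rcases List.mem_cons.mp hx with h | h
        · omega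
        · exact (List.pairwise_cons.mp hp').1 _ h
      have hL : b ≤ (b :: r).getLast (by simp) := head_le_getLast b r hp'
      have hlast : (a :: b :: r).getLast (by simp) = (b :: r).getLast (by simp) := by
        simp [List.getLast_cons]
      rw [show (a :: b :: r).head (by simp) = a from rfl, hlast,
        PySem.List.pyRange_one_append a b ((b :: r).getLast (by simp)) hab hL,
        List.filter_append]
      have h1 : (PySem.List.pyRange a b).filter (fun n => !(a :: b :: r).contains n)
          = PySem.List.pyRange (a + 1) b := by
        by_cases hab' : a < b
        · rw [PySem.List.pyRange_one_cons hab']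
          have : ∀ n ∈ PySem.List.pyRange (a + 1) b, (!(a :: b :: r).contains n) = true := by
            intro n hn
            have hn' := PySem.List.mem_pyRange_one.mp hn
            simp only [Bool.not_eq_true', List.contains_eq_mem, decide_eq_false_iff_not]
            intro hmem
            rcases List.mem_cons.mp hmem with h | h
            · omega
            · have := hbr n h; omega
          rw [List.filter_cons_of_neg (by simp)]
          exact List.filter_eq_self.mpr this
        · rw [PySem.List.pyRange_one_eq_nil (by omega), PySem.List.pyRange_one_eq_nil (by omega)]
          simp
      have h2 : (PySem.List.pyRange b ((b :: r).getLast (by simp))).filter (fun n => !(a :: b :: r).contains n)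
          = (PySem.List.pyRange b ((b :: r).getLast (by simp))).filter (fun n => !(b :: r).contains n) := by
        apply List.filter_congr
        intro n hn
        have hn' := PySem.List.mem_pyRange_one.mp hn
        have hiff : (n ∈ a :: b :: r) ↔ (n ∈ b :: r) := by
          simp only [List.mem_cons]
          constructor
          · rintro (h | h)
            · left; omega
            · exact h
          · intro h; right; exact h
        simp [List.contains_eq_mem, hiff]
      rw [h1, h2, show gaps (a :: b :: r) = PySem.List.pyRange (a + 1) b ++ gaps (b :: r) from rfl,
        ih (by simp) hp']
      rfl

-- B's indexed pair loop, read from position k on, is exactly `gaps` of the (k-1)-dropped list.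
theorem flatMap_pyRange_eq_gaps (ns : List Int) (k : Nat) (hk : 1 ≤ k) :
    (PySem.List.pyRange (k : Int) (ns.length : Int)).flatMap
        (fun i => PySem.List.pyRange (PySem.List.pyGetD ns (i - 1) 0 + 1) (PySem.List.pyGetD ns i 0))
      = gaps (ns.drop (k - 1)) := by
  by_cases h : ns.length ≤ k
  · rw [PySem.List.pyRange_one_eq_nil (by exact_mod_cast h)]
    have : (ns.drop (k - 1)).length ≤ 1 := by
      rw [List.length_drop]; omega
    rcases hd : ns.drop (k - 1) with _ | ⟨a, t⟩
    · simp [gaps]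
    · rw [hd] at this
      rcases t with _ | ⟨b, r⟩
      · simp [gaps]
      · simp at this
  · rw [Nat.not_le] at h
    rw [PySem.List.pyRange_one_cons (by exact_mod_cast h)]
    simp only [List.flatMap_cons]
    have hk1 : k - 1 < ns.length := by omega
    have hkk : k < ns.length := h
    have e1 : PySem.List.pyGetD ns ((k : Int) - 1) 0 = ns[k - 1] := by
      rw [show ((k : Int) - 1) = ((k - 1 : Nat) : Int) by omega]
      simp [PySem.List.pyGetD_natCast, List.getD_eq_getElem?_getD, hk1]
    have e2 : PySem.List.pyGetD ns (k : Int) 0 = ns[k] := by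
      simp [PySem.List.pyGetD_natCast, List.getD_eq_getElem?_getD, hkk]
    have hdrop1 : ns.drop (k - 1) = ns[k - 1] :: ns.drop k := by
      have hsucc : k - 1 + 1 = k := by omega
      rw [List.drop_eq_getElem_cons hk1, hsucc]
    have hdrop2 : ns.drop k = ns[k] :: ns.drop (k + 1) := List.drop_eq_getElem_cons hkk
    have ih := flatMap_pyRange_eq_gaps ns (k + 1) (by omega)
    rw [show ((k : Int) + 1) = ((k + 1 : Nat) : Int) by omega] at *
    rw [e1, e2, ih, hdrop1, hdrop2]
    simp [gaps]
termination_by ns.length - k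

theorem foldl_min_sorted (x : Int) (t : List Int) (h : ∀ y ∈ t, x ≤ y) :
    t.foldl min x = x := by
  induction t generalizing x with
  | nil => rfl
  | cons y r ih =>
    have hxy : x ≤ y := h y (by simp)
    simp only [List.foldl_cons, min_eq_left hxy]
    exact ih x (fun z hz => h z (by simp [hz]))

theorem foldl_max_sorted (x : Int) (t : List Int) (hp : (x :: t).Pairwise (· ≤ ·)) :
    t.foldl max x = (x :: t).getLast (by simp) := by
  induction t generalizing x with
  | nil => rfl
  | cons y r ih =>
    have hxy : x ≤ y := (List.pairwise_cons.mp hp).1 y (by simp)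
    simp only [List.foldl_cons, max_eq_right hxy]
    rw [List.getLast_cons (by simp)]
    exact ih y (List.pairwise_cons.mp hp).2

-- the central equality, on an abstract sorted list of length ≥ 2
theorem core (ns : List Int) (hp : ns.Pairwise (· ≤ ·)) (hlen : 2 ≤ ns.length) :
    ((PySem.List.pyRange (PySem.List.pyGetD ns 1 0) (PySem.List.pyGetD ns (-1) 0)).foldl
        (fun acc num => if !ns.contains num then acc ++ [num] else acc) [],
      (PySem.List.min? ns (fun x => x)).getD 0, (PySem.List.max? ns (fun x => x)).getD 0)
    = ((PySem.List.pyRange 2 (PySem.List.len ns)).foldl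
        (fun acc i => acc ++ PySem.List.pyRange (PySem.List.pyGetD ns (i - 1) 0 + 1) (PySem.List.pyGetD ns i 0)) [],
      PySem.List.pyGetD ns 0 0, PySem.List.pyGetD ns (-1) 0) := by
  rcases ns with _ | ⟨n0, t⟩
  · simp at hlen
  rcases t with _ | ⟨n1, r⟩
  · simp at hlen
  have hne : (n0 :: n1 :: r) ≠ [] := by simp
  have h01 : n0 ≤ n1 := (List.pairwise_cons.mp hp).1 n1 (by simp)
  have hp' : (n1 :: r).Pairwise (· ≤ ·) := (List.pairwise_cons.mp hp).2
  have hr : ∀ x ∈ n1 :: r, n1 ≤ x := by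
    intro x hx
    rcases List.mem_cons.mp hx with h | h
    · omega
    · exact (List.pairwise_cons.mp hp').1 _ h
  -- missing list
  have hmiss : (PySem.List.pyRange (PySem.List.pyGetD (n0 :: n1 :: r) 1 0) (PySem.List.pyGetD (n0 :: n1 :: r) (-1) 0)).foldl
        (fun acc num => if !(n0 :: n1 :: r).contains num then acc ++ [num] else acc) []
      = (PySem.List.pyRange 2 (PySem.List.len (n0 :: n1 :: r))).foldl
        (fun acc i => acc ++ PySem.List.pyRange (PySem.List.pyGetD (n0 :: n1 :: r) (i - 1) 0 + 1) (PySem.List.pyGetD (n0 :: n1 :: r) i 0)) [] := by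
    rw [PySem.List.foldl_append_eq_flatMap, PySem.List.len_eq,
      show ((2 : Int) = ((2 : Nat) : Int)) by norm_num,
      flatMap_pyRange_eq_gaps (n0 :: n1 :: r) 2 (by omega)]
    have hfold := PySem.List.foldl_append_if (fun num => !(n0 :: n1 :: r).contains num) (fun x => x)
      (PySem.List.pyRange (PySem.List.pyGetD (n0 :: n1 :: r) 1 0) (PySem.List.pyGetD (n0 :: n1 :: r) (-1) 0)) []
    rw [hfold]
    have hg1 : PySem.List.pyGetD (n0 :: n1 :: r) 1 0 = n1 := by
      rw [PySem.List.pyGetD_ofNat']; rfl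
    have hg2 : PySem.List.pyGetD (n0 :: n1 :: r) (-1) 0 = (n0 :: n1 :: r).getLast hne :=
      PySem.List.pyGetD_neg_one _ 0 hne
    rw [hg1, hg2]
    have hdrop : (n0 :: n1 :: r).drop 1 = n1 :: r := rfl
    rw [hdrop, gaps_eq_filter (n1 :: r) (by simp) hp']
    have hlast : (n0 :: n1 :: r).getLast hne = (n1 :: r).getLast (by simp) := by
      simp [List.getLast_cons]
    rw [hlast, List.map_id_fun', id]
    apply List.filter_congr
    intro n hn
    have hn' := PySem.List.mem_pyRange_one.mp hn
    have hiff : (n ∈ n0 :: n1 :: r) ↔ (n ∈ n1 :: r) := by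
      simp only [List.mem_cons]
      constructor
      · rintro (h | h)
        · left; omega
        · exact h
      · intro h; right; exact h
    simp [List.contains_eq_mem, hiff]
  -- min and max
  have hmin : (PySem.List.min? (n0 :: n1 :: r) (fun x => x)).getD 0 = PySem.List.pyGetD (n0 :: n1 :: r) 0 0 := by
    rw [PySem.List.min?_id_cons]
    have : ∀ y ∈ n1 :: r, n0 ≤ y := by
      intro y hy; have := hr y hy; omega
    rw [foldl_min_sorted n0 (n1 :: r) this, PySem.List.pyGetD_zero_cons]
    rfl
  have hmax : (PySem.List.max? (n0 :: n1 :: r) (fun x => x)).getD 0 = PySem.List.pyGetD (n0 :: n1 :: r) (-1) 0 := by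
    rw [PySem.List.max?_id_cons, foldl_max_sorted n0 (n1 :: r) hp,
      PySem.List.pyGetD_neg_one _ 0 hne]
    rfl
  rw [hmiss, hmin, hmax]

-- ===== VERDICT (by name: the statement is the Claim_ definition above) =====
theorem absent_values_spec : Claim_equal_absent_values := by
  intro crit_dict _ hpre
  unfold Spec_absent_values absent_values absent_values_alt
  simp only []
  rw [flatten_eq]
  simp only [List.nil_append]
  set nums := (PySem.Dict.ofList crit_dict).values.flatMap (fun group => group.flatMap (fun sub_grp => sub_grp)) with hnums
  have hlen : 2 ≤ (PySem.List.sorted nums (fun x => x) false).length := by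
    rw [(PySem.List.sorted_perm nums (fun x => x) false).length_eq]
    exact hpre
  have hp := PySem.List.sorted_pairwise nums (fun x => x)
  exact core (PySem.List.sorted nums (fun x => x) false) hp hlen
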